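-- pv_equiv track=rewrite | github.com/justdoths-dev/trading-bot | src/research/research_analyzer.py | _split_major_deficits
-- ===== SOURCE A (Python) =====
-- CRITICAL_MAJOR_DEFICITS = {
--     "sample_count_below_emerging_moderate",
-- }
--
-- SUPPORTING_MAJOR_DEFICITS = {
--     "median_return_below_emerging_moderate",
--     "positive_rate_below_emerging_moderate",
--     "robustness_below_emerging_moderate",
-- }
--
-- def _split_major_deficits(
--     major_deficits: list[str],
-- ) -> tuple[list[str], list[str], list[str]]:
--     critical = [item for item in major_deficits if item in CRITICAL_MAJOR_DEFICITS]
--     supporting = [item for item in major_deficits if item in SUPPORTING_MAJOR_DEFICITS]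
--     other = [
--         item
--         for item in major_deficits
--         if item not in CRITICAL_MAJOR_DEFICITS
--         and item not in SUPPORTING_MAJOR_DEFICITS
--     ]
--     return critical, supporting, other
-- ===== SOURCE B (Python) =====
-- CRITICAL_MAJOR_DEFICITS = {
--     "sample_count_below_emerging_moderate",
-- }
--
-- SUPPORTING_MAJOR_DEFICITS = {
--     "median_return_below_emerging_moderate",
--     "positive_rate_below_emerging_moderate",
--     "robustness_below_emerging_moderate",
-- }
--
--
-- def _partition(items, allowed):
--     """Stable partition: (members of allowed, the rest), in encounter order."""
--     inside, outside = [], []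
--     for item in items:
--         (inside if item in allowed else outside).append(item)
--     return inside, outside
--
--
-- def _split_major_deficits(major_deficits):
--     # Staged partitions: peel off the critical items first, then split the
--     # remainder into supporting vs other; "other" is the final remainder,
--     # never tested against both sets with a negated conjunction.
--     critical, rest = _partition(major_deficits, CRITICAL_MAJOR_DEFICITS)
--     supporting, other = _partition(rest, SUPPORTING_MAJOR_DEFICITS)
--     return critical, supporting, other
-- ===== Notes on version B (the rewrite author's own statement) =====
-- stated objective: alternative
-- what changed: Replaces A's three independent filtered scans (the third testing non-membership in both sets) with two staged stable partitions: the list is first split into critical vs rest, then the remainder alone is split into supporting vs other, so 'other' arises as a residue rather than by a negated double membership test; correct because the two constant sets are disjoint.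
import Mathlib
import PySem

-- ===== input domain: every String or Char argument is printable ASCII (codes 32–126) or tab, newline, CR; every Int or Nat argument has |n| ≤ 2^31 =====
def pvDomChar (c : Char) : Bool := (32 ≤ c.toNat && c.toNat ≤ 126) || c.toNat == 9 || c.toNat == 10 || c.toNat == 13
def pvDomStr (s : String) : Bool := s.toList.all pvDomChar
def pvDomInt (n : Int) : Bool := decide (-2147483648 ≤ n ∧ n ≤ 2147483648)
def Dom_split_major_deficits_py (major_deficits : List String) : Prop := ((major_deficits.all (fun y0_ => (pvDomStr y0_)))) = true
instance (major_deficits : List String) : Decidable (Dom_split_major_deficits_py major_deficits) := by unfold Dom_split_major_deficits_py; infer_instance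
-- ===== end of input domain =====

-- B replaces A's three filtered scans with two staged stable partitions
-- (critical vs rest, then supporting vs other on the remainder); objective: alternative.

-- ===== PORT A =====
-- the module-level set constants (Python sets of string literals → PySem.Set String)
def CRITICAL_MAJOR_DEFICITS : PySem.Set String :=
  PySem.Set.ofList ["sample_count_below_emerging_moderate"]

def SUPPORTING_MAJOR_DEFICITS : PySem.Set String :=
  PySem.Set.ofList ["median_return_below_emerging_moderate",
                    "positive_rate_below_emerging_moderate",
                    "robustness_below_emerging_moderate"]

def split_major_deficits_py (major_deficits : List String) : List String × List String × List String :=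
  let critical := major_deficits.filter (fun item => CRITICAL_MAJOR_DEFICITS.contains item)
  let supporting := major_deficits.filter (fun item => SUPPORTING_MAJOR_DEFICITS.contains item)
  let other := major_deficits.filter
    (fun item => !CRITICAL_MAJOR_DEFICITS.contains item && !SUPPORTING_MAJOR_DEFICITS.contains item)
  (critical, supporting, other)

-- ===== PORT B =====
-- _partition: one loop appending each item to `inside` or `outside` (stable)
def pyPartition (items : List String) (allowed : PySem.Set String) : List String × List String :=
  items.foldl
    (fun acc item =>
      if allowed.contains item then (acc.1 ++ [item], acc.2) else (acc.1, acc.2 ++ [item]))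
    ([], [])

def split_major_deficits_py_alt (major_deficits : List String) : List String × List String × List String :=
  let p1 := pyPartition major_deficits CRITICAL_MAJOR_DEFICITS
  let p2 := pyPartition p1.2 SUPPORTING_MAJOR_DEFICITS
  (p1.1, p2.1, p2.2)

-- ===== PRECONDITION & SPEC =====
def Spec_split_major_deficits_py (major_deficits : List String) (out : List String × List String × List String) : Prop := out = split_major_deficits_py_alt major_deficits
instance (major_deficits : List String) (out : List String × List String × List String) : Decidable (Spec_split_major_deficits_py major_deficits out) := by unfold Spec_split_major_deficits_py; infer_instance

-- ===== CLAIM =====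
def Claim_equal_split_major_deficits_py : Prop := ∀ (major_deficits : List String), Dom_split_major_deficits_py major_deficits → Spec_split_major_deficits_py major_deficits (split_major_deficits_py major_deficits)

-- ===== LEMMAS AND PROOFS =====
theorem foldl_partition (xs : List String) (s : PySem.Set String) (i o : List String) :
    xs.foldl
      (fun acc item =>
        if item ∈ s then (acc.1 ++ [item], acc.2) else (acc.1, acc.2 ++ [item]))
      (i, o) =
    (i ++ xs.filter (fun item => decide (item ∈ s)),
     o ++ xs.filter (fun item => !decide (item ∈ s))) := by
  induction xs generalizing i o with
  | nil => simp
  | cons x xs ih =>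
    simp only [List.foldl_cons, List.filter_cons]
    by_cases h : x ∈ s <;> simp [h, ih]

theorem pyPartition_eq (xs : List String) (s : PySem.Set String) :
    pyPartition xs s =
      (xs.filter (fun item => s.contains item), xs.filter (fun item => !s.contains item)) := by
  simpa [pyPartition] using foldl_partition xs s [] []

-- supporting items are never critical (the two literal sets are disjoint)
theorem supp_not_crit (x : String) (h : x ∈ SUPPORTING_MAJOR_DEFICITS) :
    x ∉ CRITICAL_MAJOR_DEFICITS := by
  have : x = "median_return_below_emerging_moderate" ∨
         x = "positive_rate_below_emerging_moderate" ∨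
         x = "robustness_below_emerging_moderate" := by
    simpa [SUPPORTING_MAJOR_DEFICITS, PySem.Set.ofList, PySem.Set.empty, PySem.Set.add,
           PySem.Set.contains] using h
  rcases this with h | h | h <;> subst h <;> decide

-- ===== VERDICT =====
theorem split_major_deficits_py_spec : Claim_equal_split_major_deficits_py := by
  intro xs _
  unfold Spec_split_major_deficits_py split_major_deficits_py split_major_deficits_py_alt
  simp only [pyPartition_eq, List.filter_filter]
  refine Prod.ext rfl (Prod.ext ?_ ?_) <;> simp only []
  · apply List.filter_congr
    intro x _
    by_cases hs : x ∈ SUPPORTING_MAJOR_DEFICITS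
    · simp [hs, supp_not_crit x hs]
    · simp [hs]
  · apply List.filter_congr
    intro x _
    exact Bool.and_comm _ _
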